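-- pv_equiv track=rewrite | github.com/pypi-data/pypi-mirror-382 | packages/pytwinnet/pytwinnet-0.1.3.tar.gz/pytwinnet-0.1.3/pytwinnet/scheduling/rr.py | round_robin_schedule
-- ===== SOURCE A (Python) =====
-- from typing import List
--
-- def round_robin_schedule(ue_ids: List[str], rb_count: int) -> List[str]:
--     if not ue_ids:
--         return []
--     out: List[str] = []
--     i = 0
--     for _ in range(rb_count):
--         out.append(ue_ids[i])
--         i = (i + 1) % len(ue_ids)
--     return out
-- ===== SOURCE B (Python) =====
-- def round_robin_schedule(ue_ids, rb_count):
--     if not ue_ids or rb_count <= 0: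
--         return []
--     q, r = divmod(rb_count, len(ue_ids))
--     return ue_ids * q + ue_ids[:r]
-- ===== Notes on version B (the rewrite author's own statement) =====
-- stated objective: simpler
-- what changed: Replaces the per-resource-block loop with modular index updates by a closed-form block construction: divmod(rb_count, len(ue_ids)) gives q full copies via list replication plus a prefix slice of the remainder.
import Mathlib
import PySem

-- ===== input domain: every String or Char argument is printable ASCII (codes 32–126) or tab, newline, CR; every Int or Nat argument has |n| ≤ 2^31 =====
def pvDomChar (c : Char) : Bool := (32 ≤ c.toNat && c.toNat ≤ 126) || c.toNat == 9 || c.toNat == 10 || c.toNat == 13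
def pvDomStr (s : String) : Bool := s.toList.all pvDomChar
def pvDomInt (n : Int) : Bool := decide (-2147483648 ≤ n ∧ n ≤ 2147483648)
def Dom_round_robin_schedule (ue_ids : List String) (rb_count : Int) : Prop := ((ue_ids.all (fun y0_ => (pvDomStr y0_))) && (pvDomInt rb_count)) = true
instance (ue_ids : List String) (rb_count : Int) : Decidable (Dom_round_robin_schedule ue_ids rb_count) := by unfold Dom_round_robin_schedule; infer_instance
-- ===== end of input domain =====

-- B replaces A's per-resource-block loop by a divmod block construction (q full copies + a prefix slice): simpler and shorter.

-- ===== PORT A =====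
-- literal port of A: a loop over range(rb_count) appending ue_ids[i] and stepping i = (i+1) % len(ue_ids)
def round_robin_schedule (ue_ids : List String) (rb_count : Int) : List String :=
  if ue_ids = [] then []
  else
    ((PySem.List.pyRange 0 rb_count 1).foldl
      (fun (st : List String × Int) _ =>
        (st.1 ++ [PySem.List.pyGetD ue_ids st.2 ""],
         PySem.Int.mod (st.2 + 1) (ue_ids.length : Int)))
      ([], 0)).1

-- ===== PORT B =====
-- literal port of Source B: guard, then q, r = divmod(rb_count, n); ue_ids * q + ue_ids[:r]
def round_robin_schedule_alt (ue_ids : List String) (rb_count : Int) : List String :=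
  if ue_ids = [] ∨ rb_count ≤ 0 then []
  else
    let q := PySem.Int.floordiv rb_count (ue_ids.length : Int)
    let r := PySem.Int.mod rb_count (ue_ids.length : Int)
    (List.replicate q.toNat ue_ids).flatten ++ PySem.List.slice ue_ids none (some r)

-- ===== PRECONDITION & SPEC =====
def Spec_round_robin_schedule (ue_ids : List String) (rb_count : Int) (out : List String) : Prop := out = round_robin_schedule_alt ue_ids rb_count
instance (ue_ids : List String) (rb_count : Int) (out : List String) : Decidable (Spec_round_robin_schedule ue_ids rb_count out) := by unfold Spec_round_robin_schedule; infer_instance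

-- ===== CLAIM (what is proved, stated in full; the proofs are below) =====
def Claim_equal_round_robin_schedule : Prop := ∀ (ue_ids : List String) (rb_count : Int), Dom_round_robin_schedule ue_ids rb_count → Spec_round_robin_schedule ue_ids rb_count (round_robin_schedule ue_ids rb_count)

-- ===== LEMMAS AND PROOFS =====

-- A's loop, abstracted to its step count (the range element is ignored by the body)
def rrLoop (ue : List String) : Nat → (List String × Int) → (List String × Int)
  | 0, st => st
  | k+1, st => rrLoop ue k
      (st.1 ++ [PySem.List.pyGetD ue st.2 ""], PySem.Int.mod (st.2 + 1) (ue.length : Int))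

theorem foldl_eq_rrLoop (ue : List String) (l : List Int) (st : List String × Int) :
    l.foldl (fun (st : List String × Int) _ =>
        (st.1 ++ [PySem.List.pyGetD ue st.2 ""],
         PySem.Int.mod (st.2 + 1) (ue.length : Int))) st = rrLoop ue l.length st := by
  induction l generalizing st with
  | nil => rfl
  | cons a l ih => simp [List.foldl, rrLoop, ih]

-- the sequence of ids emitted when cycling from index i for k steps
def cyc (ue : List String) : Nat → Nat → List String
  | 0, _ => []
  | k+1, i => ue.getD i "" :: cyc ue k ((i + 1) % ue.length)

theorem rrLoop_eq_cyc (ue : List String) (hne : ue ≠ []) (k : Nat) :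
    ∀ (out : List String) (i : Nat), i < ue.length →
    (rrLoop ue k (out, (i : Int))).1 = out ++ cyc ue k i := by
  induction k with
  | zero => intro out i _; simp [rrLoop, cyc]
  | succ k ih =>
    intro out i hi
    have hn : 0 < ue.length := List.length_pos_of_ne_nil hne
    have hmod : PySem.Int.mod ((i : Int) + 1) (ue.length : Int) = (((i + 1) % ue.length : Nat) : Int) := by
      have := PySem.Int.mod_natCast (i + 1) ue.length
      simpa using this
    have hget : PySem.List.pyGetD ue (i : Int) "" = ue.getD i "" := by
      simp [PySem.List.pyGetD_natCast, List.getD, hi]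
    simp only [rrLoop, hmod, hget]
    rw [ih (out ++ [ue.getD i ""]) ((i + 1) % ue.length) (Nat.mod_lt _ hn)]
    simp [cyc]

theorem cyc_take (ue : List String) (k : Nat) :
    ∀ i, i + k ≤ ue.length → cyc ue k i = (ue.drop i).take k := by
  induction k with
  | zero => intro i _; simp [cyc]
  | succ k ih =>
    intro i h
    have hi : i < ue.length := by omega
    have hdrop : ue.drop i = ue[i] :: ue.drop (i + 1) := List.drop_eq_getElem_cons hi
    by_cases h1 : i + 1 < ue.length
    · have : (i + 1) % ue.length = i + 1 := Nat.mod_eq_of_lt h1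
      simp only [cyc, this, ih (i + 1) (by omega), hdrop, List.take_succ_cons,
        List.getD_eq_getElem ue _ hi]
    · have hk0 : k = 0 := by omega
      subst hk0
      have hz : (i + 1) % ue.length = 0 := by
        have h2 : i + 1 = ue.length := by omega
        simp [h2]
      rw [hdrop]
      simp only [cyc, List.take_succ_cons, List.take_zero]
      simp [List.getD, List.getElem?_eq_getElem hi]

theorem cyc_add (ue : List String) (hn : 0 < ue.length) (a : Nat) :
    ∀ b i, i < ue.length → cyc ue (a + b) i = cyc ue a i ++ cyc ue b ((i + a) % ue.length) := by
  induction a with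
  | zero => intro b i hi; simp [cyc, Nat.mod_eq_of_lt hi]
  | succ a ih =>
    intro b i hi
    have : a + 1 + b = (a + b) + 1 := by omega
    rw [this]
    simp only [cyc]
    rw [ih b ((i + 1) % ue.length) (Nat.mod_lt _ hn)]
    have : ((i + 1) % ue.length + a) % ue.length = (i + (a + 1)) % ue.length := by
      rw [Nat.mod_add_mod]; congr 1; omega
    simp [this]

theorem cyc_blocks (ue : List String) (hne : ue ≠ []) (q r : Nat) (hr : r ≤ ue.length) :
    cyc ue (q * ue.length + r) 0 = (List.replicate q ue).flatten ++ (ue.take r) := by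
  have hn : 0 < ue.length := List.length_pos_of_ne_nil hne
  induction q with
  | zero =>
    simpa using cyc_take ue r 0 (by omega)
  | succ q ih =>
    have hsplit : (q + 1) * ue.length + r = ue.length + (q * ue.length + r) := by ring
    rw [hsplit, cyc_add ue hn ue.length (q * ue.length + r) 0 hn]
    have h1 : cyc ue ue.length 0 = ue := by
      simpa using cyc_take ue ue.length 0 (by omega)
    have h2 : (0 + ue.length) % ue.length = 0 := by simp
    rw [h1, h2, ih]
    simp [List.replicate_succ]

-- ===== VERDICT (by name: the statement is the Claim_ definition above) =====
theorem round_robin_schedule_spec : Claim_equal_round_robin_schedule := by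
  intro ue_ids rb_count _
  unfold Spec_round_robin_schedule round_robin_schedule round_robin_schedule_alt
  by_cases hne : ue_ids = []
  · simp [hne]
  · have hn : 0 < ue_ids.length := List.length_pos_of_ne_nil hne
    by_cases hk : rb_count ≤ 0
    · have : PySem.List.pyRange 0 rb_count 1 = [] := by
        have := PySem.List.length_pyRange_one 0 rb_count
        have hlen : (PySem.List.pyRange 0 rb_count 1).length = 0 := by
          rw [this]; omega
        exact List.eq_nil_of_length_eq_zero hlen
      simp [hne, hk, this]
    · replace hk : 0 < rb_count := by omega
      simp only [hne, (not_le.mpr hk), or_self]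
      rw [foldl_eq_rrLoop, PySem.List.length_pyRange_one]
      have hkN : rb_count = ((rb_count.toNat : Nat) : Int) := by omega
      set m : Nat := (rb_count - 0).toNat with hm
      have hm' : m = rb_count.toNat := by omega
      have hloop : (rrLoop ue_ids m ([], ((0:Nat) : Int))).1 = [] ++ cyc ue_ids m 0 :=
        rrLoop_eq_cyc ue_ids hne m [] 0 hn
      have hq : PySem.Int.floordiv rb_count (ue_ids.length : Int) = ((m / ue_ids.length : Nat) : Int) := by
        rw [hkN, ← hm']
        exact_mod_cast PySem.Int.floordiv_natCast m ue_ids.length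
      have hrr : PySem.Int.mod rb_count (ue_ids.length : Int) = ((m % ue_ids.length : Nat) : Int) := by
        rw [hkN, ← hm']
        exact_mod_cast PySem.Int.mod_natCast m ue_ids.length
      simp only [Int.ofNat_zero] at hloop
      rw [hloop, hq, hrr, PySem.List.slice_to_natCast]
      simp only [Int.toNat_natCast, List.nil_append]
      have hdecomp := (Nat.div_add_mod m ue_ids.length).symm
      rw [Nat.mul_comm] at hdecomp
      conv_lhs => rw [hdecomp]
      exact cyc_blocks ue_ids hne (m / ue_ids.length) (m % ue_ids.length) (le_of_lt (Nat.mod_lt _ hn))
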